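-- pv_equiv track=rewrite | github.com/Beamfreak/UE-Synth-Dataset-Generator | Evaluation/Foundation-Eval.py | compute_confusion_from_results
-- ===== SOURCE A (Python) =====
-- def compute_confusion_from_results(results: list, groupby_fields: list, shapenet_keys: set):
--     """Build per-group confusion matrices (true->pred counts)."""
--     groups = {}
--     for r in results:
--         if "error" in r:
--             continue
--         if groupby_fields:
--             key_parts = [f"{field}={r.get(field, 'unknown')}" for field in groupby_fields]
--             group_key = " | ".join(key_parts)
--         else:
--             group_key = "overall"
--
--         gt = r.get("gt_shapenet") or r.get("object", "unknown")
--         pred = r.get("pred_shapenet") or "unknown"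
--
--         if group_key not in groups:
--             groups[group_key] = {}
--         mat = groups[group_key]
--         if gt not in mat:
--             mat[gt] = {}
--         mat[gt][pred] = mat[gt].get(pred, 0) + 1
--     return groups
-- ===== SOURCE B (Python) =====
-- def compute_confusion_from_results(results: list, groupby_fields: list, shapenet_keys: set):
--     """Two passes: flatten to a (group, gt, pred) -> count table, then nest it."""
--     flat = {}
--     for r in results:
--         if "error" in r:
--             continue
--         if groupby_fields:
--             group_key = " | ".join(f"{field}={r.get(field, 'unknown')}" for field in groupby_fields)
--         else:
--             group_key = "overall"
--         gt = r.get("gt_shapenet") or r.get("object", "unknown")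
--         pred = r.get("pred_shapenet") or "unknown"
--         k = (group_key, gt, pred)
--         flat[k] = flat.get(k, 0) + 1
--     groups = {}
--     for (group_key, gt, pred), count in flat.items():
--         mat = groups.get(group_key, {})
--         inner = mat.get(gt, {})
--         inner[pred] = count
--         mat[gt] = inner
--         groups[group_key] = mat
--     return groups
-- ===== Notes on version B (the rewrite author's own statement) =====
-- stated objective: alternative
-- what changed: A builds the nested groups[group][gt][pred] dict incrementally inside the single row loop; B separates concerns into two differently-shaped passes: a first pass counts into a flat dict keyed by the (group_key, gt, pred) triple, a second pass nests the flat table, reproducing A's insertion orders exactly.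
import Mathlib
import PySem

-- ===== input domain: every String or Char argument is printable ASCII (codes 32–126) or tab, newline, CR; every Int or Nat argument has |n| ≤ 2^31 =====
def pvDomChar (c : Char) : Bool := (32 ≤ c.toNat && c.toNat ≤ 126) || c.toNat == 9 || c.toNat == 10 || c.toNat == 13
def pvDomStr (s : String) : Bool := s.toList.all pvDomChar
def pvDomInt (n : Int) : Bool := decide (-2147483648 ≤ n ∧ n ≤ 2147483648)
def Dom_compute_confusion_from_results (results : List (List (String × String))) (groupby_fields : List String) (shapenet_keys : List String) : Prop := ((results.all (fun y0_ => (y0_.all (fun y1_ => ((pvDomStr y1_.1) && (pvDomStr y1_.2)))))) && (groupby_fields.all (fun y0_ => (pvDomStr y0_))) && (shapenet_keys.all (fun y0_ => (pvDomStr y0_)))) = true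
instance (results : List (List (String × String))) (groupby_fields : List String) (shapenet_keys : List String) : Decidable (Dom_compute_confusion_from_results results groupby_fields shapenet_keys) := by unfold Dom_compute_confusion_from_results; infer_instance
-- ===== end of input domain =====

-- B replaces A's single loop that grows the nested groups[group][gt][pred] dict in place by two
-- differently-shaped passes: count into a flat dict keyed by the (group_key, gt, pred) triple, then
-- nest that table; same return value (objective: alternative decomposition, no speed claim).

-- shared row accessors: both Pythons contain these identical lines ('x in r', 'r.get', the
-- f-string group key, the falsy 'or' fallbacks), so both ports use the same helpers
def pvRowGet (r : List (String × String)) (k d : String) : String :=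
  (PySem.Dict.mk r).getD k d
def pvHasError (r : List (String × String)) : Bool :=
  (PySem.Dict.mk r).contains "error"
def pvGroupKey (r : List (String × String)) (groupby_fields : List String) : String :=
  if groupby_fields = [] then "overall"
  else PySem.Str.join " | " (groupby_fields.map (fun field => field ++ "=" ++ pvRowGet r field "unknown"))
-- r.get("gt_shapenet") or r.get("object", "unknown"): a missing key and an empty string are both falsy
def pvGt (r : List (String × String)) : String :=
  let g0 := pvRowGet r "gt_shapenet" ""
  if g0 = "" then pvRowGet r "object" "unknown" else g0
def pvPred (r : List (String × String)) : String :=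
  let p0 := pvRowGet r "pred_shapenet" ""
  if p0 = "" then "unknown" else p0
def pvTriple (r : List (String × String)) (groupby_fields : List String) : String × String × String :=
  (pvGroupKey r groupby_fields, pvGt r, pvPred r)

-- ===== PORT A =====
def pvStepA (groupby_fields : List String)
    (groups : PySem.Dict String (PySem.Dict String (PySem.Dict String Int)))
    (r : List (String × String)) : PySem.Dict String (PySem.Dict String (PySem.Dict String Int)) :=
  if pvHasError r then groups
  else
    let gk := pvGroupKey r groupby_fields
    let gt := pvGt r
    let pred := pvPred r
    let groups1 := if groups.contains gk then groups else groups.insert gk PySem.Dict.empty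
    let mat := groups1.getD gk PySem.Dict.empty
    let mat1 := if mat.contains gt then mat else mat.insert gt PySem.Dict.empty
    let inner := mat1.getD gt PySem.Dict.empty
    groups1.insert gk (mat1.insert gt (inner.insert pred (inner.getD pred 0 + 1)))

def pvItemsOut (g : PySem.Dict String (PySem.Dict String (PySem.Dict String Int))) :
    List (String × List (String × List (String × Int))) :=
  g.items.map (fun gm => (gm.1, gm.2.items.map (fun ti => (ti.1, ti.2.items))))

def compute_confusion_from_results (results : List (List (String × String))) (groupby_fields : List String) (shapenet_keys : List String) : List (String × List (String × List (String × Int))) :=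
  pvItemsOut (results.foldl (pvStepA groupby_fields) PySem.Dict.empty)

-- ===== PORT B =====
def pvStepFlat (groupby_fields : List String)
    (flat : PySem.Dict (String × String × String) Int)
    (r : List (String × String)) : PySem.Dict (String × String × String) Int :=
  if pvHasError r then flat
  else
    let k := pvTriple r groupby_fields
    flat.insert k (flat.getD k 0 + 1)

def pvNestStep (groups : PySem.Dict String (PySem.Dict String (PySem.Dict String Int)))
    (item : (String × String × String) × Int) : PySem.Dict String (PySem.Dict String (PySem.Dict String Int)) :=
  let mat := groups.getD item.1.1 PySem.Dict.empty
  let inner := mat.getD item.1.2.1 PySem.Dict.empty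
  groups.insert item.1.1 (mat.insert item.1.2.1 (inner.insert item.1.2.2 item.2))

def compute_confusion_from_results_alt (results : List (List (String × String))) (groupby_fields : List String) (shapenet_keys : List String) : List (String × List (String × List (String × Int))) :=
  let flat := results.foldl (pvStepFlat groupby_fields) PySem.Dict.empty
  pvItemsOut (flat.items.foldl pvNestStep PySem.Dict.empty)

-- ===== PRECONDITION & SPEC =====
def Spec_compute_confusion_from_results (results : List (List (String × String))) (groupby_fields : List String) (shapenet_keys : List String) (out : List (String × List (String × List (String × Int)))) : Prop := out = compute_confusion_from_results_alt results groupby_fields shapenet_keys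
instance (results : List (List (String × String))) (groupby_fields : List String) (shapenet_keys : List String) (out : List (String × List (String × List (String × Int)))) : Decidable (Spec_compute_confusion_from_results results groupby_fields shapenet_keys out) := by unfold Spec_compute_confusion_from_results; infer_instance

-- ===== CLAIM (what is proved, stated in full; the proofs are below) =====
def Claim_equal_compute_confusion_from_results : Prop := ∀ (results : List (List (String × String))) (groupby_fields : List String) (shapenet_keys : List String), Dom_compute_confusion_from_results results groupby_fields shapenet_keys → Spec_compute_confusion_from_results results groupby_fields shapenet_keys (compute_confusion_from_results results groupby_fields shapenet_keys)

-- ===== LEMMAS AND PROOFS =====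

-- the canonical point update both loops perform at triple k with value c
def pvBump (G : PySem.Dict String (PySem.Dict String (PySem.Dict String Int)))
    (k : String × String × String) (c : Int) : PySem.Dict String (PySem.Dict String (PySem.Dict String Int)) :=
  let mat := G.getD k.1 PySem.Dict.empty
  let inner := mat.getD k.2.1 PySem.Dict.empty
  G.insert k.1 (mat.insert k.2.1 (inner.insert k.2.2 c))

-- A's loop body at triple k: bump with the old inner count + 1
def pvAStep (G : PySem.Dict String (PySem.Dict String (PySem.Dict String Int)))
    (k : String × String × String) : PySem.Dict String (PySem.Dict String (PySem.Dict String Int)) :=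
  pvBump G k (((G.getD k.1 PySem.Dict.empty).getD k.2.1 PySem.Dict.empty).getD k.2.2 0 + 1)

def pvNest (G : PySem.Dict String (PySem.Dict String (PySem.Dict String Int)))
    (l : List ((String × String × String) × Int)) : PySem.Dict String (PySem.Dict String (PySem.Dict String Int)) :=
  l.foldl pvNestStep G

def pvInnerGet? (G : PySem.Dict String (PySem.Dict String (PySem.Dict String Int)))
    (k : String × String × String) : Option Int :=
  ((G.getD k.1 PySem.Dict.empty).getD k.2.1 PySem.Dict.empty).get? k.2.2

-- the whole chain groups[g][t][p] exists
def pvPresent (k : String × String × String)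
    (G : PySem.Dict String (PySem.Dict String (PySem.Dict String Int))) : Prop :=
  k.1 ∈ G.keys ∧ k.2.1 ∈ (G.getD k.1 PySem.Dict.empty).keys ∧
    k.2.2 ∈ ((G.getD k.1 PySem.Dict.empty).getD k.2.1 PySem.Dict.empty).keys

-- two inserts at distinct keys commute when the first key is already present (both in place, or
-- the in-place overwrite and the append are independent)
theorem pv_ins_comm {κ ν : Type} [BEq κ] [LawfulBEq κ] (d : PySem.Dict κ ν) (a b : κ) (x y : ν)
    (ha : a ∈ d.keys) (hne : a ≠ b) :
    (d.insert a x).insert b y = (d.insert b y).insert a x := by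
  have hca : d.contains a = true := (PySem.Dict.contains_iff_mem_keys d a).mpr ha
  have hab : (a == b) = false := beq_eq_false_iff_ne.mpr hne
  have hba : (b == a) = false := beq_eq_false_iff_ne.mpr hne.symm
  apply PySem.Dict.ext
  by_cases hcb : d.contains b = true
  · rw [PySem.Dict.items_insert_of_contains _ y (by simp [PySem.Dict.contains_insert, hba, hcb]),
        PySem.Dict.items_insert_of_contains _ x hca,
        PySem.Dict.items_insert_of_contains _ x (by simp [PySem.Dict.contains_insert, hab, hca]),
        PySem.Dict.items_insert_of_contains _ y hcb,
        List.map_map, List.map_map]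
    apply List.map_congr_left
    intro p _
    by_cases hpa : (p.1 == a) = true
    · have : (p.1 == b) = false := by
        have := eq_of_beq hpa; subst this; exact hab
      simp [Function.comp, hpa, this, hab]
    · by_cases hpb : (p.1 == b) = true
      · simp [Function.comp, hpa, hpb, hba]
      · simp [Function.comp, hpa, hpb]
  · have hcb' : d.contains b = false := by simpa using hcb
    rw [PySem.Dict.items_insert_of_not_contains _ y (by simp [PySem.Dict.contains_insert, hba, hcb']),
        PySem.Dict.items_insert_of_contains _ x hca,
        PySem.Dict.items_insert_of_contains _ x (by simp [PySem.Dict.contains_insert, hab, hca]),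
        PySem.Dict.items_insert_of_not_contains _ y hcb',
        List.map_append]
    simp [hba]

theorem pv_nestStep_eq_bump (G : PySem.Dict String (PySem.Dict String (PySem.Dict String Int)))
    (q : (String × String × String) × Int) : pvNestStep G q = pvBump G q.1 q.2 := rfl

theorem pv_bump_bump (G : PySem.Dict String (PySem.Dict String (PySem.Dict String Int)))
    (k : String × String × String) (c0 c : Int) : pvBump (pvBump G k c0) k c = pvBump G k c := by
  simp [pvBump, PySem.Dict.getD_insert_self, PySem.Dict.insert_insert_self]

theorem pv_present_bump_self (k : String × String × String)
    (G : PySem.Dict String (PySem.Dict String (PySem.Dict String Int))) (c : Int) :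
    pvPresent k (pvBump G k c) := by
  simp [pvPresent, pvBump, PySem.Dict.getD_insert_self, PySem.Dict.mem_keys_insert]

theorem pv_present_bump (k q : String × String × String)
    (G : PySem.Dict String (PySem.Dict String (PySem.Dict String Int)))
    (c : Int) (h : pvPresent k G) : pvPresent k (pvBump G q c) := by
  obtain ⟨h1, h2, h3⟩ := h
  refine ⟨?_, ?_, ?_⟩
  · simp only [pvBump, PySem.Dict.mem_keys_insert]; exact Or.inr h1
  · simp only [pvBump, PySem.Dict.getD_insert]
    split_ifs with e1
    · rw [← e1]
      simp only [PySem.Dict.mem_keys_insert]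
      exact Or.inr h2
    · exact h2
  · simp only [pvBump, PySem.Dict.getD_insert]
    split_ifs with e1
    · rw [← e1]
      simp only [PySem.Dict.getD_insert]
      split_ifs with e2
      · rw [← e2]
        simp only [PySem.Dict.mem_keys_insert]
        exact Or.inr h3
      · exact h3
    · exact h3

theorem pv_bump_swap (k q : String × String × String) (c c' : Int)
    (G : PySem.Dict String (PySem.Dict String (PySem.Dict String Int)))
    (hne : q ≠ k) (hp : pvPresent k G) :
    pvBump (pvBump G k c) q c' = pvBump (pvBump G q c') k c := by
  obtain ⟨g, t, p⟩ := k
  obtain ⟨g', t', p'⟩ := q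
  obtain ⟨h1, h2, h3⟩ := hp
  simp only [pvBump]
  by_cases hg : g' = g
  · subst hg
    by_cases ht : t' = t
    · subst ht
      have hp' : p' ≠ p := by rintro rfl; exact hne rfl
      simp only [PySem.Dict.getD_insert_self, PySem.Dict.insert_insert_self]
      rw [pv_ins_comm _ p p' _ _ h3 (fun h => hp' h.symm)]
    · have ht' : t ≠ t' := fun h => ht h.symm
      simp only [PySem.Dict.getD_insert_self, PySem.Dict.insert_insert_self,
        PySem.Dict.getD_insert_of_ne _ _ _ ht, PySem.Dict.getD_insert_of_ne _ _ _ ht']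
      rw [pv_ins_comm _ t t' _ _ h2 ht']
  · have hg' : g ≠ g' := fun h => hg h.symm
    simp only [PySem.Dict.getD_insert_of_ne _ _ _ hg, PySem.Dict.getD_insert_of_ne _ _ _ hg']
    rw [pv_ins_comm _ g g' _ _ h1 hg']

theorem pv_nest_bump_comm (k : String × String × String) (c : Int)
    (l : List ((String × String × String) × Int)) (hk : ∀ q ∈ l, q.1 ≠ k) :
    ∀ G, pvPresent k G → pvNest (pvBump G k c) l = pvBump (pvNest G l) k c := by
  induction l with
  | nil => intro G _; rfl
  | cons q l ih =>
    intro G hp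
    have hq : q.1 ≠ k := hk q (List.mem_cons_self)
    show pvNest (pvNestStep (pvBump G k c) q) l = pvBump (pvNest (pvNestStep G q) l) k c
    rw [pv_nestStep_eq_bump, pv_nestStep_eq_bump,
        pv_bump_swap k q.1 c q.2 G hq hp]
    exact ih (fun r hr => hk r (List.mem_cons_of_mem _ hr)) _ (pv_present_bump k q.1 G q.2 hp)

theorem pv_innerGet?_bump_ne (G : PySem.Dict String (PySem.Dict String (PySem.Dict String Int)))
    (k q : String × String × String) (c : Int) (hne : q ≠ k) :
    pvInnerGet? (pvBump G q c) k = pvInnerGet? G k := by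
  obtain ⟨g, t, p⟩ := k
  obtain ⟨g', t', p'⟩ := q
  simp only [pvInnerGet?, pvBump, PySem.Dict.getD_insert]
  split_ifs with e1
  · subst e1
    simp only [PySem.Dict.getD_insert]
    split_ifs with e2
    · subst e2
      have hp' : p ≠ p' := by rintro rfl; exact hne rfl
      exact PySem.Dict.get?_insert_of_ne _ _ hp'
    · rfl
  · rfl

theorem pv_innerGet?_nest (k : String × String × String)
    (l : List ((String × String × String) × Int)) (hk : ∀ q ∈ l, q.1 ≠ k) :
    ∀ G, pvInnerGet? (pvNest G l) k = pvInnerGet? G k := by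
  induction l with
  | nil => intro G; rfl
  | cons q l ih =>
    intro G
    show pvInnerGet? (pvNest (pvNestStep G q) l) k = _
    rw [ih (fun r hr => hk r (List.mem_cons_of_mem _ hr)), pv_nestStep_eq_bump,
        pv_innerGet?_bump_ne G k q.1 q.2 (hk q List.mem_cons_self)]

theorem pv_innerGet?_bump_self (G : PySem.Dict String (PySem.Dict String (PySem.Dict String Int)))
    (k : String × String × String) (c : Int) : pvInnerGet? (pvBump G k c) k = some c := by
  simp [pvInnerGet?, pvBump, PySem.Dict.getD_insert_self, PySem.Dict.get?_insert_self]

theorem pv_astep_eq (G : PySem.Dict String (PySem.Dict String (PySem.Dict String Int)))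
    (k : String × String × String) :
    pvAStep G k = pvBump G k ((pvInnerGet? G k).getD 0 + 1) := by
  unfold pvAStep pvInnerGet?
  rw [PySem.Dict.getD_eq_get?_getD]

-- main lemma: A's incremental fold over the triples = nesting the counter of the triples
theorem pv_main (ks : List (String × String × String)) :
    ks.foldl pvAStep PySem.Dict.empty = pvNest PySem.Dict.empty (PySem.Dict.counter ks).items := by
  induction ks using List.reverseRecOn with
  | nil => rfl
  | append_singleton ks k ih =>
    have hcnt : PySem.Dict.counter (ks ++ [k])
        = (PySem.Dict.counter ks).insert k ((PySem.Dict.counter ks).getD k 0 + 1) := by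
      rw [← PySem.Dict.foldl_insert_getD_add_one_eq_counter (ks ++ [k]), List.foldl_append,
          PySem.Dict.foldl_insert_getD_add_one_eq_counter ks]
      rfl
    rw [List.foldl_append, List.foldl_cons, List.foldl_nil, ih, hcnt]
    by_cases hk : k ∈ ks
    · -- k already counted: the insert overwrites in place, A bumps the existing inner count
      have hcon : (PySem.Dict.counter ks).contains k = true := by
        rw [PySem.Dict.contains_counter]; simpa using hk
      have hgd : (PySem.Dict.counter ks).getD k 0 = (List.count k ks : Int) :=
        PySem.Dict.getD_counter ks k
      have hsome : (PySem.Dict.counter ks).get? k = some ((List.count k ks : Int)) := by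
        have hs : ((PySem.Dict.counter ks).get? k).isSome := by
          rw [← PySem.Dict.contains_eq_isSome_get?]; exact hcon
        obtain ⟨v, hv⟩ := Option.isSome_iff_exists.mp hs
        have h2 := PySem.Dict.getD_eq_get?_getD (PySem.Dict.counter ks) k 0
        rw [hv, hgd] at h2
        simp at h2
        rw [hv, h2]
      have hmem : (k, (List.count k ks : Int)) ∈ (PySem.Dict.counter ks).items :=
        PySem.Dict.mem_items_of_get?_eq_some _ hsome
      have hnd : ((PySem.Dict.counter ks).items.map Prod.fst).Nodup :=
        PySem.Dict.nodup_keys_counter ks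
      obtain ⟨l1, l2, hL2⟩ := List.append_of_mem hmem
      have hnd' := hnd
      rw [hL2] at hnd'
      simp only [List.map_append, List.map_cons, List.nodup_append, List.nodup_cons] at hnd'
      have hk1 : ∀ q ∈ l1, q.1 ≠ k := fun q hq =>
        hnd'.2.2 q.1 (List.mem_map_of_mem hq) k List.mem_cons_self
      have hk2 : ∀ q ∈ l2, q.1 ≠ k := by
        intro q hq hqk
        exact hnd'.2.1.1 (hqk ▸ List.mem_map_of_mem hq)
      rw [hgd, PySem.Dict.items_insert_of_contains _ _ hcon]
      have hmap : (PySem.Dict.counter ks).items.map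
            (fun p => if (p.1 == k) = true then (k, (List.count k ks : Int) + 1) else p)
          = l1 ++ (k, (List.count k ks : Int) + 1) :: l2 := by
        rw [hL2, List.map_append, List.map_cons]
        congr 1
        · rw [List.map_congr_left (fun q hq => if_neg (by simp [hk1 q hq]))]; simp
        · congr 1
          · simp
          · rw [List.map_congr_left (fun q hq => if_neg (by simp [hk2 q hq]))]; simp
      rw [hmap]
      have hG1 : pvNest PySem.Dict.empty (PySem.Dict.counter ks).items
          = pvNest (pvBump (pvNest PySem.Dict.empty l1) k (List.count k ks : Int)) l2 := by
        rw [hL2]; unfold pvNest; rw [List.foldl_append]; rfl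
      have hRHS : pvNest PySem.Dict.empty (l1 ++ (k, (List.count k ks : Int) + 1) :: l2)
          = pvBump (pvNest PySem.Dict.empty (PySem.Dict.counter ks).items) k ((List.count k ks : Int) + 1) := by
        have h0 : pvNest PySem.Dict.empty (l1 ++ (k, (List.count k ks : Int) + 1) :: l2)
            = pvNest (pvBump (pvNest PySem.Dict.empty l1) k ((List.count k ks : Int) + 1)) l2 := by
          unfold pvNest; rw [List.foldl_append]; rfl
        rw [h0, ← pv_bump_bump (pvNest PySem.Dict.empty l1) k (List.count k ks : Int) ((List.count k ks : Int) + 1),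
            pv_nest_bump_comm k _ l2 hk2 _ (pv_present_bump_self k _ _), hG1]
      rw [hRHS, pv_astep_eq]
      congr 1
      rw [hG1, pv_innerGet?_nest k l2 hk2, pv_innerGet?_bump_self]
      rfl
    · -- k fresh: the insert appends (k, 1), A creates the entries with count 0 + 1
      have hcon : (PySem.Dict.counter ks).contains k = false := by
        rw [PySem.Dict.contains_counter]; simpa using hk
      have hgd : (PySem.Dict.counter ks).getD k 0 = 0 := by
        rw [PySem.Dict.getD_counter]
        simp [List.count_eq_zero_of_not_mem hk]
      rw [hgd, PySem.Dict.items_insert_of_not_contains _ _ hcon]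
      have hRHS : pvNest PySem.Dict.empty ((PySem.Dict.counter ks).items ++ [(k, 0 + 1)])
          = pvBump (pvNest PySem.Dict.empty (PySem.Dict.counter ks).items) k (0 + 1) := by
        unfold pvNest; rw [List.foldl_append]; rfl
      rw [hRHS, pv_astep_eq]
      congr 1
      have hnone : pvInnerGet? (pvNest PySem.Dict.empty (PySem.Dict.counter ks).items) k = none := by
        rw [pv_innerGet?_nest k _ ?_ PySem.Dict.empty]
        · simp [pvInnerGet?, PySem.Dict.getD_empty, PySem.Dict.get?_empty]
        · intro q hq hqk
          apply hk
          have hkeys : q.1 ∈ (PySem.Dict.counter ks).keys :=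
            PySem.Dict.mem_keys_of_mem_items _ hq
          rw [PySem.Dict.keys_counter] at hkeys
          exact hqk ▸ (PySem.Set.mem_ofList ks q.1).mp hkeys
      rw [hnone]
      rfl

-- Python's 'if k not in d: d[k] = v' pattern ('setdefault' shape) read back through getD / insert
def pvSD {κ ν : Type} [BEq κ] (d : PySem.Dict κ ν) (k : κ) (v : ν) : PySem.Dict κ ν :=
  if d.contains k then d else d.insert k v

theorem pv_sd_getD {κ ν : Type} [BEq κ] [LawfulBEq κ] (d : PySem.Dict κ ν) (k : κ) (v : ν) :
    (pvSD d k v).getD k v = d.getD k v := by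
  unfold pvSD
  split_ifs with hc
  · rfl
  · rw [PySem.Dict.getD_insert_self]
    exact (PySem.Dict.getD_of_not_contains _ _ (by simpa using hc)).symm

theorem pv_sd_insert {κ ν : Type} [BEq κ] [LawfulBEq κ] (d : PySem.Dict κ ν) (k : κ) (v w : ν) :
    (pvSD d k v).insert k w = d.insert k w := by
  unfold pvSD
  split_ifs with hc
  · rfl
  · rw [PySem.Dict.insert_insert_self]

theorem pv_body_eq (G : PySem.Dict String (PySem.Dict String (PySem.Dict String Int))) (gk gt p : String) :
    (pvSD G gk PySem.Dict.empty).insert gk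
      ((pvSD ((pvSD G gk PySem.Dict.empty).getD gk PySem.Dict.empty) gt PySem.Dict.empty).insert gt
        (((pvSD ((pvSD G gk PySem.Dict.empty).getD gk PySem.Dict.empty) gt PySem.Dict.empty).getD gt PySem.Dict.empty).insert p
          (((pvSD ((pvSD G gk PySem.Dict.empty).getD gk PySem.Dict.empty) gt PySem.Dict.empty).getD gt PySem.Dict.empty).getD p 0 + 1)))
    = pvAStep G (gk, gt, p) := by
  rw [pv_sd_getD, pv_sd_getD, pv_sd_insert, pv_sd_insert]
  rfl

theorem pv_stepA_eq (groupby_fields : List String)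
    (G : PySem.Dict String (PySem.Dict String (PySem.Dict String Int)))
    (r : List (String × String)) (h : pvHasError r = false) :
    pvStepA groupby_fields G r = pvAStep G (pvTriple r groupby_fields) := by
  unfold pvStepA
  rw [if_neg (by simp [h])]
  exact pv_body_eq G (pvGroupKey r groupby_fields) (pvGt r) (pvPred r)

-- ===== VERDICT (by name: the statement is the Claim_ definition above) =====
theorem compute_confusion_from_results_spec : Claim_equal_compute_confusion_from_results := by
  intro results groupby_fields shapenet_keys _
  unfold Spec_compute_confusion_from_results compute_confusion_from_results compute_confusion_from_results_alt
  have hA : results.foldl (pvStepA groupby_fields) PySem.Dict.empty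
      = ((results.filter (fun r => !pvHasError r)).map (fun r => pvTriple r groupby_fields)).foldl
          pvAStep PySem.Dict.empty := by
    rw [PySem.List.foldl_congr_mem results (pvStepA groupby_fields)
        (fun G r => if (!pvHasError r) = true then pvAStep G (pvTriple r groupby_fields) else G)
        PySem.Dict.empty ?_]
    · rw [PySem.List.foldl_if_eq_foldl_filter]
      exact (List.foldl_map).symm
    · intro G r _
      by_cases h : pvHasError r
      · simp [pvStepA, h]
      · have h' : pvHasError r = false := by simpa using h
        rw [pv_stepA_eq groupby_fields G r h']
        simp [h']
  have hB : results.foldl (pvStepFlat groupby_fields) PySem.Dict.empty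
      = PySem.Dict.counter
          ((results.filter (fun r => !pvHasError r)).map (fun r => pvTriple r groupby_fields)) := by
    rw [PySem.List.foldl_congr_mem results (pvStepFlat groupby_fields)
        (fun d r => if (!pvHasError r) = true
          then d.insert (pvTriple r groupby_fields) (d.getD (pvTriple r groupby_fields) 0 + 1) else d)
        PySem.Dict.empty ?_]
    · rw [PySem.List.foldl_if_eq_foldl_filter,
          ← PySem.Dict.foldl_insert_getD_add_one_eq_counter, List.foldl_map]
    · intro d r _
      by_cases h : pvHasError r
      · simp [pvStepFlat, h]
      · have h' : pvHasError r = false := by simpa using h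
        simp [pvStepFlat, h']
  rw [hA, hB, pv_main]
  rfl
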